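-- pv_equiv track=rewrite | github.com/dmitrypol/covid19 | app/services.py | row_date_diff
-- ===== SOURCE A (Python) =====
-- def row_date_diff(row):
--     #   [['03-22-2020', '100'], ['03-23-2020', '110'], ['03-24-2020', '130'], ['03-25-2020', '160'], ['03-26-2020', '200']]
--     len_row = len(row)
--     for index, current in enumerate(row[::-1]):
--         if index < len_row - 1:
--             prev = row[len_row - index - 2]
--             diff = int(current[1]) - int(prev[1])
--             row[len_row - index - 1][1] = str(diff)
--     return row
-- ===== SOURCE B (Python) =====
-- def row_date_diff(row):
--     # Forward single pass carrying the previous original value (captured before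
--     # overwriting). Mutates row in place like the original and returns it.
--     if len(row) < 2:
--         return row
--     prev = row[0][1]
--     for cur in row[1:]:
--         cur_val = cur[1]
--         cur[1] = str(int(cur_val) - int(prev))
--         prev = cur_val
--     return row
-- ===== Notes on version B (the rewrite author's own statement) =====
-- stated objective: simpler
-- what changed: Replaces the backward pass over the reversed copy with its index arithmetic (len_row - index - 1/2) by a plain forward pass that carries the previous row's original value in a variable; an early return handles rows shorter than 2.
import Mathlib
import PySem

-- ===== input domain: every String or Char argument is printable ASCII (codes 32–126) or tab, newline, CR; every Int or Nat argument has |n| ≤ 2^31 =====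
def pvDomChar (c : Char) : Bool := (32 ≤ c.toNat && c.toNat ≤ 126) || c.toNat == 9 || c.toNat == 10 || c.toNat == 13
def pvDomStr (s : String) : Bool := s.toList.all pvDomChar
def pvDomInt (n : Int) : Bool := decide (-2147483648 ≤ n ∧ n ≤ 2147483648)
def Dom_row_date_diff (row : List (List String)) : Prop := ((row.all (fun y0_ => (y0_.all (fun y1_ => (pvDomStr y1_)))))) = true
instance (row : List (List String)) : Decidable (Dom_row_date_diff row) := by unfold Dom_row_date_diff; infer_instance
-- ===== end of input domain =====

-- B rewrites the reversed-index backward pass of A as a forward pass carrying the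
-- previous row's original value (objective: simpler). Both Pythons mutate `row` in
-- place and return it; the equivalence proved here is about the return value.


-- ===== PORT A =====
-- loop body of A: (index, current) from enumerate(row[::-1]), in-place update of acc
def rowStep (lenRow : Int) (acc : List (List String)) (ic : Int × List String) : List (List String) :=
  if ic.1 < lenRow - 1 then
    let prev := PySem.List.pyGetD acc (lenRow - ic.1 - 2) []
    let diff := (PySem.Int.ofStr? (PySem.List.pyGetD ic.2 1 "")).getD 0
                - (PySem.Int.ofStr? (PySem.List.pyGetD prev 1 "")).getD 0
    PySem.List.pySetD acc (lenRow - ic.1 - 1)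
      (PySem.List.pySetD (PySem.List.pyGetD acc (lenRow - ic.1 - 1) []) 1 (PySem.Int.toStr diff))
  else acc

-- row[::-1] = row.reverse (PySem.List.slice?_none_none_neg_one)
def row_date_diff (row : List (List String)) : List (List String) :=
  (PySem.List.enumerate row.reverse).foldl (rowStep (row.length : Int)) row

-- ===== PORT B =====
-- B's loop over row[1:], carrying prev (the previous row's original value string)
def rowDiffGo (prev : String) : List (List String) → List (List String)
  | [] => []
  | cur :: rest =>
    let curVal := PySem.List.pyGetD cur 1 ""
    let diff := (PySem.Int.ofStr? curVal).getD 0 - (PySem.Int.ofStr? prev).getD 0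
    PySem.List.pySetD cur 1 (PySem.Int.toStr diff) :: rowDiffGo curVal rest

def row_date_diff_alt (row : List (List String)) : List (List String) :=
  if row.length < 2 then row
  else
    match row with
    | [] => row
    | first :: rest => first :: rowDiffGo (PySem.List.pyGetD first 1 "") rest

-- ===== PRECONDITION & SPEC =====
-- Pre_ excludes exactly the inputs on which Python A raises: with 2 or more rows,
-- every row needs at least 2 entries (else IndexError) and an int()-parseable
-- entry at index 1 (else ValueError); with 0 or 1 rows A returns unconditionally.
def Pre_row_date_diff (row : List (List String)) : Prop :=
  row.length ≤ 1 ∨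
    ∀ r ∈ row, 2 ≤ r.length ∧ (PySem.Int.ofStr? (r[1]?.getD "")).isSome = true
instance (row : List (List String)) : Decidable (Pre_row_date_diff row) := by
  unfold Pre_row_date_diff; infer_instance

def pvWitness_row_date_diff : List (List String) :=
  [["03-22-2020", "100"], ["03-23-2020", "110"], ["03-24-2020", "130"]]

def Spec_row_date_diff (row : List (List String)) (out : List (List String)) : Prop := out = row_date_diff_alt row
instance (row : List (List String)) (out : List (List String)) : Decidable (Spec_row_date_diff row out) := by unfold Spec_row_date_diff; infer_instance

-- ===== CLAIM (what is proved, stated in full; the proofs are below) =====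
def Claim_equal_row_date_diff : Prop := ∀ (row : List (List String)), Dom_row_date_diff row → Pre_row_date_diff row → Spec_row_date_diff row (row_date_diff row)

-- ===== LEMMAS AND PROOFS =====

-- the string B carries as `prev` after consuming xs (starting from prev)
def lastVal (prev : String) : List (List String) → String
  | [] => prev
  | c :: cs => lastVal (PySem.List.pyGetD c 1 "") cs

-- the last output element both programs produce for a trailing row b whose
-- predecessor's original value (string) is prevVal
def diffElem (b : List String) (prevVal : String) : List String :=
  PySem.List.pySetD b 1 (PySem.Int.toStr
    ((PySem.Int.ofStr? (PySem.List.pyGetD b 1 "")).getD 0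
      - (PySem.Int.ofStr? prevVal).getD 0))

theorem lastVal_getLast (xs : List (List String)) :
    ∀ (prev : String) (h : xs ≠ []),
      lastVal prev xs = PySem.List.pyGetD (xs.getLast h) 1 "" := by
  induction xs with
  | nil => intro _ h; exact absurd rfl h
  | cons c cs ih =>
    intro prev _
    cases cs with
    | nil => simp [lastVal]
    | cons d ds =>
      rw [List.getLast_cons (by simp)]
      exact ih (PySem.List.pyGetD c 1 "") (by simp)

theorem rowStep_length (n : Int) (acc : List (List String)) (ic : Int × List String) :
    (rowStep n acc ic).length = acc.length := by
  unfold rowStep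
  split
  · simp [PySem.List.length_pySetD]
  · rfl

theorem rowStep_shift (m : Nat) (acc : List (List String)) (t : List String)
    (i : Int) (hi : 0 ≤ i) (c : List String) (hlen : acc.length = m) :
    rowStep ((m : Int) + 1) (acc ++ [t]) (i + 1, c) = rowStep (m : Int) acc (i, c) ++ [t] := by
  unfold rowStep
  by_cases hg : i < (m : Int) - 1
  · have hg' : i + 1 < (m : Int) + 1 - 1 := by omega
    rw [if_pos hg', if_pos hg]
    have e2 : (m : Int) + 1 - (i + 1) - 2 = (m : Int) - i - 2 := by ring
    have e1 : (m : Int) + 1 - (i + 1) - 1 = (m : Int) - i - 1 := by ring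
    rw [e1, e2]
    have h2lo : (0:Int) ≤ (m : Int) - i - 2 := by omega
    have h2hi : (m : Int) - i - 2 < (acc.length : Int) := by omega
    have h2hi' : (m : Int) - i - 2 < ((acc ++ [t]).length : Int) := by simp; omega
    have h1lo : (0:Int) ≤ (m : Int) - i - 1 := by omega
    have h1hi : (m : Int) - i - 1 < (acc.length : Int) := by omega
    have h1hi' : (m : Int) - i - 1 < ((acc ++ [t]).length : Int) := by simp; omega
    have hnat : ((m : Int) - i - 1).toNat < acc.length := by omega
    rw [PySem.List.pyGetD_eq_getElem _ _ h2lo h2hi', PySem.List.pyGetD_eq_getElem _ _ h2lo h2hi,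
        PySem.List.pyGetD_eq_getElem _ _ h1lo h1hi', PySem.List.pyGetD_eq_getElem _ _ h1lo h1hi,
        PySem.List.pySetD_of_nonneg _ _ h1lo, PySem.List.pySetD_of_nonneg _ _ h1lo]
    rw [List.getElem_append_left (by omega), List.getElem_append_left (by omega),
        List.set_append_left _ _ hnat]
  · have hg' : ¬ (i + 1 < (m : Int) + 1 - 1) := by omega
    rw [if_neg hg', if_neg hg]

theorem enumerate_ge {α : Type} (xs : List α) (s : Int) :
    ∀ ic ∈ PySem.List.enumerate xs s, s ≤ ic.1 := by
  induction xs generalizing s with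
  | nil => simp [PySem.List.enumerate_nil]
  | cons x xs ih =>
    intro ic hic
    rw [PySem.List.enumerate_cons] at hic
    rcases List.mem_cons.mp hic with h | h
    · simp [h]
    · have := ih (s + 1) ic h; omega

theorem enumerate_shift {α : Type} (xs : List α) (s : Int) :
    PySem.List.enumerate xs (s + 1)
      = (PySem.List.enumerate xs s).map (fun ic => (ic.1 + 1, ic.2)) := by
  induction xs generalizing s with
  | nil => simp [PySem.List.enumerate_nil]
  | cons x xs ih =>
    rw [PySem.List.enumerate_cons, PySem.List.enumerate_cons, List.map_cons, ih (s + 1)]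

theorem fold_shift (es : List (Int × List String)) :
    ∀ (acc : List (List String)) (t : List String) (m : Nat), acc.length = m →
      (∀ ic ∈ es, 0 ≤ ic.1) →
      (es.map (fun ic => (ic.1 + 1, ic.2))).foldl (rowStep ((m : Int) + 1)) (acc ++ [t])
        = es.foldl (rowStep (m : Int)) acc ++ [t] := by
  induction es with
  | nil => intro acc t m _ _; rfl
  | cons e es ih =>
    intro acc t m hlen hpos
    obtain ⟨i, c⟩ := e
    rw [List.map_cons, List.foldl_cons, List.foldl_cons,
        rowStep_shift m acc t i (hpos (i, c) (by simp)) c hlen]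
    exact ih _ t m (by rw [rowStep_length]; exact hlen)
      (fun ic hmem => hpos ic (List.mem_cons_of_mem _ hmem))

-- A on row ++ [b] (row nonempty): A on row, then the diff of b against row's last
theorem row_date_diff_append (row : List (List String)) (b : List String) (h : row ≠ []) :
    row_date_diff (row ++ [b])
      = row_date_diff row ++ [diffElem b (PySem.List.pyGetD (row.getLast h) 1 "")] := by
  unfold row_date_diff
  have hm : 1 ≤ row.length := List.length_pos_of_ne_nil h
  rw [List.reverse_append]
  simp only [List.reverse_singleton, List.singleton_append]
  rw [PySem.List.enumerate_cons, List.foldl_cons]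
  have hcast : ((row ++ [b]).length : Int) = (row.length : Int) + 1 := by simp
  rw [hcast]
  -- first iteration: index 0, current = b, writes position row.length
  have hstep : rowStep ((row.length : Int) + 1) (row ++ [b]) (0, b)
      = row ++ [diffElem b (PySem.List.pyGetD (row.getLast h) 1 "")] := by
    unfold rowStep
    have hg : (0:Int) < (row.length : Int) + 1 - 1 := by omega
    rw [if_pos hg]
    have e2 : (row.length : Int) + 1 - 0 - 2 = ((row.length - 1 : Nat) : Int) := by omega
    have e1 : (row.length : Int) + 1 - 0 - 1 = ((row.length : Nat) : Int) := by omega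
    simp only [e1, e2, PySem.List.pyGetD_natCast, PySem.List.pySetD_natCast]
    have hb : (row ++ [b]).getD row.length [] = b := by simp [List.getD]
    have hprev : (row ++ [b]).getD (row.length - 1) [] = row.getLast h := by
      rw [List.getD_eq_getElem _ _ (by simp), List.getElem_append_left (by omega),
          List.getLast_eq_getElem]
    have hset : ∀ x, (row ++ [b]).set row.length x = row ++ [x] := by
      intro x
      rw [List.set_append_right _ _ (le_refl _)]
      simp
    rw [hb, hprev, hset]
    rfl
  rw [hstep, enumerate_shift _ 0]
  exact fold_shift _ row _ row.length rfl (enumerate_ge row.reverse 0)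

theorem rowDiffGo_append (xs : List (List String)) :
    ∀ (prev : String) (b : List String),
      rowDiffGo prev (xs ++ [b]) = rowDiffGo prev xs ++ [diffElem b (lastVal prev xs)] := by
  induction xs with
  | nil =>
    intro prev b
    simp [rowDiffGo, diffElem, lastVal]
  | cons c cs ih =>
    intro prev b
    simp only [List.cons_append, rowDiffGo]
    rw [ih]
    rfl

theorem alt_cons (first : List String) (rest : List (List String)) :
    row_date_diff_alt (first :: rest)
      = first :: rowDiffGo (PySem.List.pyGetD first 1 "") rest := by
  cases rest with
  | nil => simp [row_date_diff_alt, rowDiffGo]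
  | cons d ds => simp [row_date_diff_alt]

theorem alt_append (row : List (List String)) (b : List String) (h : row ≠ []) :
    row_date_diff_alt (row ++ [b])
      = row_date_diff_alt row ++ [diffElem b (PySem.List.pyGetD (row.getLast h) 1 "")] := by
  cases row with
  | nil => exact absurd rfl h
  | cons first rest =>
    rw [List.cons_append, alt_cons, alt_cons, rowDiffGo_append, List.cons_append]
    congr 3
    cases rest with
    | nil => simp [lastVal]
    | cons d ds =>
      rw [lastVal_getLast _ _ (by simp)]
      rw [show (first :: d :: ds).getLast h = (d :: ds).getLast (by simp) from
        List.getLast_cons (by simp)]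

theorem ports_agree (row : List (List String)) :
    row_date_diff row = row_date_diff_alt row := by
  induction row using List.reverseRecOn with
  | nil => rfl
  | append_singleton row b ih =>
    by_cases hnil : row = []
    · subst hnil
      simp only [List.nil_append]
      unfold row_date_diff row_date_diff_alt
      simp [PySem.List.enumerate_cons, PySem.List.enumerate_nil, rowStep]
    · rw [row_date_diff_append row b hnil, alt_append row b hnil, ih]

-- ===== VERDICT (by name: the statement is the Claim_ definition above) =====
theorem row_date_diff_spec : Claim_equal_row_date_diff := by
  intro row _ _
  unfold Spec_row_date_diff
  exact ports_agree row
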